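-- pv_equiv track=rewrite | github.com/iminsuk2018-dev/iminsuk | core/smart/duplicate_detector.py | _group_by_hash
-- ===== SOURCE A (Python) =====
-- from typing import List, Dict, Tuple, Optional
--
-- def _group_by_hash(docs: List[Dict]) -> List[List[Dict]]:
--     """Group documents by file hash"""
--     hash_map = {}
--
--     for doc in docs:
--         file_hash = doc.get('file_hash')
--         if file_hash:
--             if file_hash not in hash_map:
--                 hash_map[file_hash] = []
--             hash_map[file_hash].append(doc)
--
--     return [group for group in hash_map.values() if len(group) > 1]
-- ===== SOURCE B (Python) =====
-- from typing import List, Dict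
--
-- def _group_by_hash(docs: List[Dict]) -> List[List[Dict]]:
--     """Group documents by file hash (two-pass: count first, then build only duplicate groups)."""
--     counts = {}
--     for doc in docs:
--         h = doc.get('file_hash')
--         if h:
--             counts[h] = counts.get(h, 0) + 1
--     groups = {}
--     for doc in docs:
--         h = doc.get('file_hash')
--         if h and counts[h] > 1:
--             groups.setdefault(h, []).append(doc)
--     return list(groups.values())
-- ===== Notes on version B (the rewrite author's own statement) =====
-- stated objective: alternative
-- what changed: A builds every hash group in one pass and filters out singleton groups at the end; B first counts occurrences of each truthy file_hash, then a second pass collects only docs whose hash count exceeds 1, so singleton groups are never built.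
import Mathlib
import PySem

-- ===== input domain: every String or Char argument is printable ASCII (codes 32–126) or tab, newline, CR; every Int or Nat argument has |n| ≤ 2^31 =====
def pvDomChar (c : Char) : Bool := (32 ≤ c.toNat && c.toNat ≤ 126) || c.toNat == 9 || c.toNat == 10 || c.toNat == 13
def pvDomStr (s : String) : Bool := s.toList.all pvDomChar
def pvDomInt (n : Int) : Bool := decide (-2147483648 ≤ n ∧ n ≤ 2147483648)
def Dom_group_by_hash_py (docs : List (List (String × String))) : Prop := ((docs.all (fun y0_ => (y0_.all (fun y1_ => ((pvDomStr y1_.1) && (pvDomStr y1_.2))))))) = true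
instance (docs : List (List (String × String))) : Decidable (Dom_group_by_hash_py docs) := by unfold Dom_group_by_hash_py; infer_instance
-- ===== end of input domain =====

-- B replaces A's single pass that builds every group and filters afterwards by a two-pass
-- count-then-collect that only ever builds duplicate groups; alternative decomposition, same result.


-- ===== PORT A =====
-- doc.get('file_hash'): a Python dict is a List (String × String); lookup is first match.
def pvHashOf (doc : List (String × String)) : Option String :=
  (PySem.Dict.mk doc).get? "file_hash"

def group_by_hash_py (docs : List (List (String × String))) : List (List (List (String × String))) :=
  let hash_map : PySem.Dict String (List (List (String × String))) :=
    docs.foldl (fun hash_map doc =>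
      match pvHashOf doc with
      | none => hash_map
      | some fh =>
        if fh = "" then hash_map
        else
          let hm := if hash_map.contains fh then hash_map else hash_map.insert fh []
          hm.insert fh (hm.getD fh [] ++ [doc])) PySem.Dict.empty
  hash_map.values.filter (fun group => decide (group.length > 1))

-- ===== PORT B =====
def group_by_hash_py_alt (docs : List (List (String × String))) : List (List (List (String × String))) :=
  let counts : PySem.Dict String Int :=
    docs.foldl (fun counts doc =>
      match pvHashOf doc with
      | none => counts
      | some h => if h = "" then counts else counts.insert h (counts.getD h 0 + 1)) PySem.Dict.empty
  let groups : PySem.Dict String (List (List (String × String))) :=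
    docs.foldl (fun groups doc =>
      match pvHashOf doc with
      | none => groups
      | some h =>
        if h = "" then groups
        else if counts.getD h 0 > 1 then
          let g := groups.setdefault h []
          g.insert h (g.getD h [] ++ [doc])
        else groups) PySem.Dict.empty
  groups.values

-- ===== PRECONDITION & SPEC =====
def Spec_group_by_hash_py (docs : List (List (String × String))) (out : List (List (List (String × String)))) : Prop := out = group_by_hash_py_alt docs
instance (docs : List (List (String × String))) (out : List (List (List (String × String)))) : Decidable (Spec_group_by_hash_py docs out) := by unfold Spec_group_by_hash_py; infer_instance

-- ===== CLAIM (what is proved, stated in full; the proofs are below) =====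
def Claim_equal_group_by_hash_py : Prop := ∀ (docs : List (List (String × String))), Dom_group_by_hash_py docs → Spec_group_by_hash_py docs (group_by_hash_py docs)

-- ===== LEMMAS AND PROOFS =====

-- the (hash, doc) pairs both loops actually process: docs with a truthy file_hash
def pvKeyed (doc : List (String × String)) : Option (String × List (String × String)) :=
  match pvHashOf doc with
  | none => none
  | some fh => if fh = "" then none else some (fh, doc)

theorem pv_ensure_insert_eq_modify {ν : Type} (d : PySem.Dict String (List ν)) (k : String) (v : ν) :
    (let hm := if d.contains k then d else d.insert k ([] : List ν);
     hm.insert k (hm.getD k [] ++ [v])) = d.modify k [] (fun g => g ++ [v]) := by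
  simp only [PySem.Dict.modify]
  by_cases h : d.contains k
  · simp [h]
  · simp only [h, Bool.false_eq_true, ite_false]
    rw [PySem.Dict.getD_insert_self, PySem.Dict.insert_insert_self,
        PySem.Dict.getD_of_not_contains _ _ (by simpa using h)]

theorem pv_setdefault_insert_eq_modify {ν : Type} (d : PySem.Dict String (List ν)) (k : String) (v : ν) :
    (let g := d.setdefault k ([] : List ν);
     g.insert k (g.getD k [] ++ [v])) = d.modify k [] (fun g => g ++ [v]) := by
  by_cases h : d.contains k
  · rw [PySem.Dict.setdefault_of_contains _ _ h]; simp [PySem.Dict.modify]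
  · rw [PySem.Dict.setdefault_of_not_contains _ _ (by simpa using h)]
    simp only [PySem.Dict.modify]
    rw [PySem.Dict.getD_insert_self, PySem.Dict.insert_insert_self,
        PySem.Dict.getD_of_not_contains _ _ (by simpa using h)]

theorem pv_ofList_filter {α : Type} [BEq α] [LawfulBEq α] (q : α → Bool) (l : List α) :
    PySem.Set.ofList (l.filter q) = (PySem.Set.ofList l).filter q := by
  induction l using List.reverseRecOn with
  | nil => rfl
  | append_singleton l x ih =>
    rw [List.filter_append, PySem.Set.ofList_append_singleton]
    by_cases hq : q x
    · simp only [List.filter_cons, hq, ite_true, List.filter_nil,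
        PySem.Set.ofList_append_singleton, ih, PySem.Set.add_eq_ite]
      by_cases hm : x ∈ PySem.Set.ofList l
      · have hm2 : x ∈ (PySem.Set.ofList l).filter q := List.mem_filter.2 ⟨hm, hq⟩
        simp [hm, hm2]
      · have hm' : x ∉ (PySem.Set.ofList l).filter q := by
          intro hc; exact hm (List.mem_of_mem_filter hc)
        simp [hm, hm', List.filter_append, hq]
    · simp only [List.filter_cons, hq, Bool.false_eq_true, ite_false, List.filter_nil,
        List.append_nil, ih, PySem.Set.add_eq_ite]
      by_cases hm : x ∈ PySem.Set.ofList l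
      · simp [hm]
      · simp [hm, List.filter_append, hq]

-- the modify-fold both loops reduce to
def pvGStep (d : PySem.Dict String (List (List (String × String))))
    (p : String × List (String × String)) : PySem.Dict String (List (List (String × String))) :=
  d.modify p.1 [] (fun g => g ++ [p.2])

theorem pvA_fold_eq (docs : List (List (String × String)))
    (d : PySem.Dict String (List (List (String × String)))) :
    docs.foldl (fun hash_map doc =>
      match pvHashOf doc with
      | none => hash_map
      | some fh =>
        if fh = "" then hash_map
        else
          (if hash_map.contains fh then hash_map else hash_map.insert fh []).insert fh
            ((if hash_map.contains fh then hash_map else hash_map.insert fh []).getD fh [] ++ [doc])) d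
    = (docs.filterMap pvKeyed).foldl pvGStep d := by
  rw [List.foldl_filterMap]
  congr 1
  funext hm doc
  unfold pvKeyed
  cases h : pvHashOf doc with
  | none => rfl
  | some fh =>
    by_cases he : fh = ""
    · simp [he]
    · simpa [he, pvGStep] using pv_ensure_insert_eq_modify hm fh doc

theorem pvC_getD (docs : List (List (String × String))) (h : String) :
    (docs.foldl (fun counts doc =>
      match pvHashOf doc with
      | none => counts
      | some h => if h = "" then counts else counts.insert h (counts.getD h 0 + 1))
      (PySem.Dict.empty : PySem.Dict String Int)).getD h 0
    = (((docs.filterMap pvKeyed).map (fun p => p.1)).count h : Int) := by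
  have : docs.foldl (fun counts doc =>
      match pvHashOf doc with
      | none => counts
      | some h => if h = "" then counts else counts.insert h (counts.getD h 0 + 1))
      (PySem.Dict.empty : PySem.Dict String Int)
      = ((docs.filterMap pvKeyed).map (fun p => p.1)).foldl
          (fun d x => d.insert x (d.getD x 0 + 1)) PySem.Dict.empty := by
    rw [List.foldl_map, List.foldl_filterMap]
    congr 1
    funext c doc
    unfold pvKeyed
    cases hh : pvHashOf doc with
    | none => rfl
    | some fh => by_cases he : fh = "" <;> simp [he]
  rw [this, PySem.Dict.getD_foldl_insert_add_one, PySem.Dict.getD_empty, zero_add]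

theorem pvB_fold2_eq (docs : List (List (String × String)))
    (C : PySem.Dict String Int) :
    docs.foldl (fun groups doc =>
      match pvHashOf doc with
      | none => groups
      | some h =>
        if h = "" then groups
        else if C.getD h 0 > 1 then
          (groups.setdefault h []).insert h ((groups.setdefault h []).getD h [] ++ [doc])
        else groups) PySem.Dict.empty
    = ((docs.filterMap pvKeyed).filter (fun p => decide (C.getD p.1 0 > 1))).foldl
        pvGStep PySem.Dict.empty := by
  rw [List.foldl_filter, List.foldl_filterMap]
  congr 1
  funext d doc
  unfold pvKeyed
  cases h : pvHashOf doc with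
  | none => rfl
  | some fh =>
    by_cases he : fh = ""
    · simp [he]
    · by_cases hc : C.getD fh 0 > 1
      · simpa [he, hc, pvGStep] using pv_setdefault_insert_eq_modify d fh doc
      · simp [he, hc]

-- characterization of the modify-fold: values in first-occurrence key order
theorem pvGFold_values (P : List (String × List (String × String))) :
    (P.foldl pvGStep PySem.Dict.empty).values
    = (PySem.Set.ofList (P.map (fun p => p.1))).map
        (fun k => (P.filter (fun p => p.1 == k)).map (fun p => p.2)) := by
  have hnd : (P.foldl pvGStep PySem.Dict.empty).keys.Nodup := by
    have := PySem.Dict.nodup_keys_foldl_modify_key P (fun p => p.1) []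
      (fun _ p => fun g => g ++ [p.2]) PySem.Dict.empty (by simp)
    simpa [pvGStep] using this
  have hkeys : (P.foldl pvGStep PySem.Dict.empty).keys
      = PySem.Set.ofList (P.map (fun p => p.1)) := by
    have := PySem.Dict.keys_foldl_modify_key P (fun p => p.1) []
      (fun _ p => fun g => g ++ [p.2]) PySem.Dict.empty
    simpa [pvGStep, PySem.Set.update_nil_left] using this
  rw [PySem.Dict.values_eq_map_keys _ hnd [], hkeys]
  apply List.map_congr_left
  intro k _
  have := PySem.Dict.getD_foldl_modify_append P PySem.Dict.empty k
  simpa [pvGStep] using this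

theorem group_by_hash_py_spec' (docs : List (List (String × String))) :
    group_by_hash_py docs = group_by_hash_py_alt docs := by
  simp only [group_by_hash_py, group_by_hash_py_alt]
  rw [pvA_fold_eq, pvB_fold2_eq, pvGFold_values, pvGFold_values]
  simp only [pvC_getD]
  set P := docs.filterMap pvKeyed with hP
  set hs := P.map (fun p => p.1) with hhs
  set q : String → Bool := fun k => decide (1 < hs.count k) with hq
  have hqc : ∀ k : String, (decide ((hs.count k : Int) > 1)) = q k := by
    intro k; simp [hq]
  -- A side: filter over the mapped groups = map over the filtered keys
  have hA : (List.filter (fun group => decide (group.length > 1))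
      ((PySem.Set.ofList hs).map
        (fun k => (P.filter (fun p => p.1 == k)).map (fun p => p.2))))
      = ((PySem.Set.ofList hs).filter q).map
        (fun k => (P.filter (fun p => p.1 == k)).map (fun p => p.2)) := by
    rw [List.filter_map]
    congr 1
    apply List.filter_congr
    intro k _
    simp only [Function.comp, List.length_map, ← List.countP_eq_length_filter, hq, hhs,
      List.count_eq_countP, List.countP_map, Function.comp_def]
  rw [hA]
  -- B side: keys of the filtered fold
  have hkeysB : (List.filter (fun p => decide ((hs.count p.1 : Int) > 1)) P).map
      (fun p => p.1) = hs.filter q := by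
    rw [hhs, List.filter_map]
    congr 1
    apply List.filter_congr
    intro p _
    simp [Function.comp, hq, ← hhs]
  rw [hkeysB, pv_ofList_filter]
  -- groups agree on every surviving key
  apply List.map_congr_left
  intro k hk
  have hqk : q k = true := (List.mem_filter.1 hk).2
  rw [List.filter_filter]
  congr 1
  apply List.filter_congr
  intro p _
  cases hbe : p.1 == k with
  | false => simp
  | true =>
    have hpk : p.1 = k := by simpa using hbe
    have h2 : q p.1 = true := by rw [hpk]; exact hqk
    simp only [hq, decide_eq_true_eq] at h2
    rw [hpk] at h2
    simp [hpk, h2]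

-- ===== VERDICT (by name: the statement is the Claim_ definition above) =====
theorem group_by_hash_py_spec : Claim_equal_group_by_hash_py := by
  intro docs _
  exact group_by_hash_py_spec' docs
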